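-- pv_equiv track=rewrite | github.com/heavenruler/dba_career | tidb/#3-1_#3-2_compare.py | merge_threads
-- ===== SOURCE A (Python) =====
-- def merge_threads(a, b):
--     threads = sorted({t for t, _ in a} | {t for t, _ in b})
--     a_map = {t: rps for t, rps in a}
--     b_map = {t: rps for t, rps in b}
--     rows = []
--     for t in threads:
--         rows.append((t, a_map.get(t), b_map.get(t)))
--     return rows
-- ===== SOURCE B (Python) =====
-- def merge_threads(a, b):
--     def last_wins(pairs):
--         # keep the last occurrence of each thread key (scan reversed, keep first seen)
--         seen = set()
--         out = []
--         for t, v in reversed(pairs):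
--             if t not in seen:
--                 seen.add(t)
--                 out.append((t, v))
--         out.reverse()
--         return out
--
--     xs = sorted(last_wins(a), key=lambda p: p[0])
--     ys = sorted(last_wins(b), key=lambda p: p[0])
--     rows = []
--     i, j = 0, 0
--     while i < len(xs) and j < len(ys):
--         ta, va = xs[i]
--         tb, vb = ys[j]
--         if ta < tb:
--             rows.append((ta, va, None))
--             i += 1
--         elif tb < ta:
--             rows.append((tb, None, vb))
--             j += 1
--         else:
--             rows.append((ta, va, vb))
--             i += 1
--             j += 1
--     while i < len(xs):
--         ta, va = xs[i]
--         rows.append((ta, va, None))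
--         i += 1
--     while j < len(ys):
--         tb, vb = ys[j]
--         rows.append((tb, None, vb))
--         j += 1
--     return rows
-- ===== Notes on version B (the rewrite author's own statement) =====
-- stated objective: alternative
-- what changed: Replaces the set-union/dict-lookup construction by a last-wins dedup of each side followed by sorting and a classic two-pointer merge that emits one row per distinct key.
import Mathlib
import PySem

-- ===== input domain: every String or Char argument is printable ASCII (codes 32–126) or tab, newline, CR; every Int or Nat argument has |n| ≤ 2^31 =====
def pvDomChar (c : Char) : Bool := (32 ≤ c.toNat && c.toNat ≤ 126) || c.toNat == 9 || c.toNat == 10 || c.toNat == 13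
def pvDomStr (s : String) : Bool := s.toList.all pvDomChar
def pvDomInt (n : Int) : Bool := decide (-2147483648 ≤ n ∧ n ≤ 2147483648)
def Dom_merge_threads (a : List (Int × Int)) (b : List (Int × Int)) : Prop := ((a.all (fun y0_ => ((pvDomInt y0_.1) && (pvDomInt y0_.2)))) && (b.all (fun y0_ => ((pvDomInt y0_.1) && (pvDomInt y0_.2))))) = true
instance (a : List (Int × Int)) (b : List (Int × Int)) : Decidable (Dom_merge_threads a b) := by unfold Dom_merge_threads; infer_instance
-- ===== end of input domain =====

-- B replaces A's set-union + two dict lookups by last-wins dedup, sort, and a two-pointer merge (alternative decomposition, same cost).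


-- ===== PORT A =====
def merge_threads (a : List (Int × Int)) (b : List (Int × Int)) : List (Int × Option Int × Option Int) :=
  let threads := PySem.List.sorted
      (PySem.Set.union (PySem.Set.ofList (a.map (fun p => p.1))) (PySem.Set.ofList (b.map (fun p => p.1))))
      (fun t => t) false
  let a_map : PySem.Dict Int Int := a.foldl (fun d p => d.insert p.1 p.2) PySem.Dict.empty
  let b_map : PySem.Dict Int Int := b.foldl (fun d p => d.insert p.1 p.2) PySem.Dict.empty
  threads.foldl (fun rows t => rows ++ [(t, a_map.get? t, b_map.get? t)]) []

-- ===== PORT B =====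
-- Source B's last_wins: scan reversed(pairs) with a seen-set, keep first hits, reverse back
def pvLastWins (pairs : List (Int × Int)) : List (Int × Int) :=
  (pairs.reverse.foldl
    (fun (st : PySem.Set Int × List (Int × Int)) p =>
      if PySem.Set.contains st.1 p.1 then st
      else (PySem.Set.add st.1 p.1, st.2 ++ [p]))
    (PySem.Set.empty, [])).2.reverse

-- Source B's two-pointer while loops (the two trailing drains are the one-sided cases)
def pvMerge : List (Int × Int) → List (Int × Int) → List (Int × Option Int × Option Int)
  | [], ys => ys.map (fun p => (p.1, none, some p.2))
  | x :: xs, [] => (x :: xs).map (fun p => (p.1, some p.2, none))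
  | x :: xs, y :: ys =>
    if x.1 < y.1 then (x.1, some x.2, none) :: pvMerge xs (y :: ys)
    else if y.1 < x.1 then (y.1, none, some y.2) :: pvMerge (x :: xs) ys
    else (x.1, some x.2, some y.2) :: pvMerge xs ys
termination_by xs ys => xs.length + ys.length
decreasing_by all_goals (simp only [List.length_cons]; omega)

def merge_threads_alt (a : List (Int × Int)) (b : List (Int × Int)) : List (Int × Option Int × Option Int) :=
  pvMerge (PySem.List.sorted (pvLastWins a) (fun p => p.1) false)
          (PySem.List.sorted (pvLastWins b) (fun p => p.1) false)

-- ===== PRECONDITION & SPEC =====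
def Spec_merge_threads (a : List (Int × Int)) (b : List (Int × Int)) (out : List (Int × Option Int × Option Int)) : Prop := out = merge_threads_alt a b
instance (a : List (Int × Int)) (b : List (Int × Int)) (out : List (Int × Option Int × Option Int)) : Decidable (Spec_merge_threads a b out) := by unfold Spec_merge_threads; infer_instance

-- ===== CLAIM (what is proved, stated in full; the proofs are below) =====
def Claim_equal_merge_threads : Prop := ∀ (a : List (Int × Int)) (b : List (Int × Int)), Dom_merge_threads a b → Spec_merge_threads a b (merge_threads a b)

-- ===== LEMMAS AND PROOFS =====

-- last occurrence lookup in an association list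
def pvLastLook (x : List (Int × Int)) (t : Int) : Option Int := List.lookup t x.reverse

theorem pv_lookup_cons (t : Int) (p : Int × Int) (l : List (Int × Int)) :
    List.lookup t (p :: l) = if t = p.1 then some p.2 else List.lookup t l := by
  rcases p with ⟨k, v⟩
  by_cases h : t = k
  · simp [List.lookup, h]
  · have hb : (t == k) = false := beq_eq_false_iff_ne.mpr h
    simp [List.lookup, hb, h]

theorem pv_lookup_append (t : Int) (l l' : List (Int × Int)) :
    List.lookup t (l ++ l') = (List.lookup t l).or (List.lookup t l') := by
  induction l with
  | nil => simp
  | cons p l ih =>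
    rw [List.cons_append, pv_lookup_cons, pv_lookup_cons]
    by_cases h : t = p.1 <;> simp [h, ih]

-- first-wins filter with an explicit seen list (proof model of pvLastWins' fold)
def pvFW : List (Int × Int) → List Int → List (Int × Int)
  | [], _ => []
  | p :: r, seen => if p.1 ∈ seen then pvFW r seen else p :: pvFW r (p.1 :: seen)

theorem pvFW_congr (r : List (Int × Int)) (s₁ s₂ : List Int)
    (h : ∀ t, t ∈ s₁ ↔ t ∈ s₂) : pvFW r s₁ = pvFW r s₂ := by
  induction r generalizing s₁ s₂ with
  | nil => rfl
  | cons p r ih =>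
    simp only [pvFW]
    by_cases hp : p.1 ∈ s₁
    · rw [if_pos hp, if_pos ((h p.1).1 hp), ih _ _ h]
    · rw [if_neg hp, if_neg (fun hc => hp ((h p.1).2 hc))]
      congr 1
      exact ih _ _ (by intro t; simp [h t])

theorem pvLastWins_foldl (r : List (Int × Int)) (s : PySem.Set Int) (acc : List (Int × Int)) :
    (r.foldl
      (fun (st : PySem.Set Int × List (Int × Int)) p =>
        if PySem.Set.contains st.1 p.1 then st
        else (PySem.Set.add st.1 p.1, st.2 ++ [p]))
      (s, acc)).2 = acc ++ pvFW r s := by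
  induction r generalizing s acc with
  | nil => simp [pvFW]
  | cons p r ih =>
    simp only [List.foldl_cons, pvFW]
    by_cases hp : p.1 ∈ s
    · rw [if_pos (by simpa [PySem.Set.contains_iff] using hp), if_pos hp, ih]
    · rw [if_neg (by simpa [PySem.Set.contains_iff] using hp), if_neg hp, ih]
      rw [pvFW_congr r (PySem.Set.add s p.1) (p.1 :: s) (by intro t; simp [PySem.Set.mem_add]; tauto)]
      simp

theorem pvLastWins_eq (x : List (Int × Int)) : pvLastWins x = (pvFW x.reverse []).reverse := by
  unfold pvLastWins
  rw [pvLastWins_foldl]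
  simp

theorem lookup_pvFW (r : List (Int × Int)) (seen : List Int) (t : Int) :
    List.lookup t (pvFW r seen) = if t ∈ seen then none else List.lookup t r := by
  induction r generalizing seen with
  | nil => simp [pvFW]
  | cons p r ih =>
    simp only [pvFW]
    by_cases hp : p.1 ∈ seen
    · rw [if_pos hp, ih, pv_lookup_cons]
      by_cases ht : t ∈ seen
      · simp [ht]
      · have hne : ¬ (t = p.1) := fun h => ht (h ▸ hp)
        simp [ht, hne]
    · rw [if_neg hp, pv_lookup_cons, pv_lookup_cons, ih]
      by_cases ht : t = p.1
      · subst ht; simp [hp]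
      · by_cases hts : t ∈ seen <;> simp [hts, ht]

theorem keys_pvFW_nodup (r : List (Int × Int)) (seen : List Int) :
    ((pvFW r seen).map (fun p => p.1)).Nodup ∧ ∀ t ∈ (pvFW r seen).map (fun p => p.1), t ∉ seen := by
  induction r generalizing seen with
  | nil => simp [pvFW]
  | cons p r ih =>
    simp only [pvFW]
    by_cases hp : p.1 ∈ seen
    · simpa [hp] using ih seen
    · obtain ⟨h1, h2⟩ := ih (p.1 :: seen)
      refine ⟨?_, ?_⟩
      · simp only [if_neg hp, List.map_cons, List.nodup_cons]
        exact ⟨fun hc => by simpa using (h2 _ hc), h1⟩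
      · intro t ht
        simp only [if_neg hp, List.map_cons, List.mem_cons] at ht
        rcases ht with h | h
        · exact h ▸ hp
        · exact fun hc => (h2 _ h) (List.mem_cons_of_mem _ hc)

theorem mem_keys_pvFW (r : List (Int × Int)) (seen : List Int) (t : Int) :
    t ∈ (pvFW r seen).map (fun p => p.1) ↔ t ∈ r.map (fun p => p.1) ∧ t ∉ seen := by
  induction r generalizing seen with
  | nil => simp [pvFW]
  | cons p r ih =>
    simp only [pvFW]
    by_cases hp : p.1 ∈ seen
    · rw [if_pos hp]
      simp only [List.map_cons, List.mem_cons, ih]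
      by_cases ht : t = p.1
      · subst ht; simp [hp]
      · simp [ht]
    · rw [if_neg hp]
      simp only [List.map_cons, List.mem_cons, ih]
      by_cases ht : t = p.1
      · subst ht; simp [hp]
      · simp [ht]

-- lookup lemmas
theorem lookup_eq_none_iff (l : List (Int × Int)) (t : Int) :
    List.lookup t l = none ↔ t ∉ l.map (fun p => p.1) := by
  induction l with
  | nil => simp
  | cons p l ih =>
    rw [pv_lookup_cons]
    by_cases h : t = p.1 <;> simp [h, ih]

theorem lookup_eq_some_iff (l : List (Int × Int)) (t : Int) (v : Int)
    (h : (l.map (fun p => p.1)).Nodup) :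
    List.lookup t l = some v ↔ (t, v) ∈ l := by
  induction l with
  | nil => simp
  | cons p l ih =>
    rcases p with ⟨k, w⟩
    simp only [List.map_cons, List.nodup_cons] at h
    rw [pv_lookup_cons]
    by_cases ht : t = k
    · subst ht
      rw [if_pos rfl]
      constructor
      · intro h'
        obtain rfl : w = v := by simpa using h'
        exact List.mem_cons_self
      · intro h'
        rcases List.mem_cons.1 h' with h' | h'
        · simp only [Prod.mk.injEq] at h'
          simp [h'.2]
        · exact absurd (List.mem_map.2 ⟨_, h', rfl⟩) h.1
    · rw [if_neg ht]
      rw [ih h.2]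
      simp only [List.mem_cons, Prod.mk.injEq]
      constructor
      · exact fun h' => Or.inr h'
      · rintro (⟨h1, _⟩ | h')
        · exact absurd h1 ht
        · exact h'

theorem lookup_perm {l l' : List (Int × Int)} (hp : l.Perm l')
    (h : (l.map (fun p => p.1)).Nodup) (t : Int) :
    List.lookup t l = List.lookup t l' := by
  have h' : (l'.map (fun p => p.1)).Nodup := ((hp.map _).nodup_iff).1 h
  cases hv : List.lookup t l with
  | none =>
    rw [lookup_eq_none_iff] at hv
    symm; rw [lookup_eq_none_iff]
    intro hc; exact hv ((hp.map (fun p => p.1)).mem_iff.2 hc)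
  | some v =>
    rw [lookup_eq_some_iff _ _ _ h] at hv
    symm; rw [lookup_eq_some_iff _ _ _ h']
    exact hp.mem_iff.1 hv

theorem lookup_pvLastWins (x : List (Int × Int)) (t : Int) :
    List.lookup t (pvLastWins x) = pvLastLook x t := by
  rw [pvLastWins_eq]
  have hnd : (((pvFW x.reverse []).reverse).map (fun p => p.1)).Nodup := by
    rw [List.map_reverse, List.nodup_reverse]
    exact (keys_pvFW_nodup x.reverse []).1
  rw [lookup_perm (List.reverse_perm _) hnd t, lookup_pvFW]
  simp [pvLastLook]

theorem keys_pvLastWins_nodup (x : List (Int × Int)) :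
    ((pvLastWins x).map (fun p => p.1)).Nodup := by
  rw [pvLastWins_eq, List.map_reverse, List.nodup_reverse]
  exact (keys_pvFW_nodup x.reverse []).1

theorem mem_keys_pvLastWins (x : List (Int × Int)) (t : Int) :
    t ∈ (pvLastWins x).map (fun p => p.1) ↔ t ∈ x.map (fun p => p.1) := by
  rw [pvLastWins_eq, List.map_reverse, List.mem_reverse, mem_keys_pvFW]
  simp

-- Dict built by a fold of inserts looks up the LAST binding
theorem dict_foldl_get? (l : List (Int × Int)) (d : PySem.Dict Int Int) (t : Int) :
    (l.foldl (fun d p => d.insert p.1 p.2) d).get? t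
      = (List.lookup t l.reverse).or (d.get? t) := by
  induction l generalizing d with
  | nil => simp
  | cons p l ih =>
    simp only [List.foldl_cons, List.reverse_cons, ih, pv_lookup_append, pv_lookup_cons]
    rw [PySem.Dict.get?_insert]
    by_cases ht : t = p.1 <;> simp [ht]

-- sorted key-list of strictly increasing keys
def pvKMerge : List Int → List Int → List Int
  | [], ys => ys
  | x :: xs, [] => x :: xs
  | x :: xs, y :: ys =>
    if x < y then x :: pvKMerge xs (y :: ys)
    else if y < x then y :: pvKMerge (x :: xs) ys
    else x :: pvKMerge xs ys
termination_by xs ys => xs.length + ys.length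
decreasing_by all_goals (simp only [List.length_cons]; omega)

theorem mem_pvKMerge (xs ys : List Int) (t : Int) :
    t ∈ pvKMerge xs ys ↔ t ∈ xs ∨ t ∈ ys := by
  induction xs, ys using pvKMerge.induct with
  | case1 ys => simp [pvKMerge]
  | case2 x xs => simp [pvKMerge]
  | case3 x xs y ys h ih => rw [pvKMerge]; simp only [if_pos h, List.mem_cons, ih]; tauto
  | case4 x xs y ys h h' ih => rw [pvKMerge]; simp only [if_neg h, if_pos h', List.mem_cons, ih]; tauto
  | case5 x xs y ys h h' ih =>
    have hxy : x = y := by omega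
    rw [pvKMerge]; simp only [if_neg h, if_neg h', List.mem_cons, ih]
    subst hxy; tauto

theorem pairwise_pvKMerge (xs ys : List Int)
    (hx : xs.Pairwise (· < ·)) (hy : ys.Pairwise (· < ·)) :
    (pvKMerge xs ys).Pairwise (· < ·) := by
  induction xs, ys using pvKMerge.induct with
  | case1 ys => simpa [pvKMerge] using hy
  | case2 x xs => simpa [pvKMerge] using hx
  | case3 x xs y ys h ih =>
    rw [pvKMerge, if_pos h]
    rcases List.pairwise_cons.1 hx with ⟨hx1, hx2⟩
    rcases List.pairwise_cons.1 hy with ⟨hy1, hy2⟩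
    refine List.pairwise_cons.2 ⟨?_, ih hx2 hy⟩
    intro u hu
    rcases (mem_pvKMerge _ _ _).1 hu with hu | hu
    · exact hx1 u hu
    · rcases List.mem_cons.1 hu with rfl | hu
      · exact h
      · exact lt_trans h (hy1 u hu)
  | case4 x xs y ys h h' ih =>
    rw [pvKMerge, if_neg h, if_pos h']
    rcases List.pairwise_cons.1 hx with ⟨hx1, hx2⟩
    rcases List.pairwise_cons.1 hy with ⟨hy1, hy2⟩
    refine List.pairwise_cons.2 ⟨?_, ih hx hy2⟩
    intro u hu
    rcases (mem_pvKMerge _ _ _).1 hu with hu | hu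
    · rcases List.mem_cons.1 hu with rfl | hu
      · exact h'
      · exact lt_trans h' (hx1 u hu)
    · exact hy1 u hu
  | case5 x xs y ys h h' ih =>
    have hxy : x = y := by omega
    subst hxy
    rw [pvKMerge, if_neg h, if_neg h']
    rcases List.pairwise_cons.1 hx with ⟨hx1, hx2⟩
    rcases List.pairwise_cons.1 hy with ⟨hy1, hy2⟩
    refine List.pairwise_cons.2 ⟨?_, ih hx2 hy2⟩
    intro u hu
    rcases (mem_pvKMerge _ _ _).1 hu with hu | hu
    · exact hx1 u hu
    · exact hy1 u hu

theorem pvMerge_eq (xs ys : List (Int × Int))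
    (hx : (xs.map (fun p => p.1)).Pairwise (· < ·))
    (hy : (ys.map (fun p => p.1)).Pairwise (· < ·)) :
    pvMerge xs ys
      = (pvKMerge (xs.map (fun p => p.1)) (ys.map (fun p => p.1))).map
          (fun t => (t, List.lookup t xs, List.lookup t ys)) := by
  have hndx : (xs.map (fun p => p.1)).Nodup := hx.imp ne_of_lt
  have hndy : (ys.map (fun p => p.1)).Nodup := hy.imp ne_of_lt
  induction xs, ys using pvMerge.induct with
  | case1 ys =>
    rw [pvMerge, List.map_nil, pvKMerge, List.map_map]
    apply List.map_congr_left
    intro p hp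
    simp only [Function.comp_apply]
    rw [(lookup_eq_some_iff ys p.1 p.2 hndy).2 hp]
    simp
  | case2 x xs =>
    rw [pvMerge, List.map_nil]
    have hk : pvKMerge ((x :: xs).map (fun p => p.1)) [] = (x :: xs).map (fun p => p.1) := by
      rw [List.map_cons, pvKMerge]
    rw [hk, List.map_map]
    apply List.map_congr_left
    intro p hp
    simp only [Function.comp_apply]
    rw [(lookup_eq_some_iff _ p.1 p.2 hndx).2 hp]
    simp
  | case3 x xs y ys h ih =>
    simp only [List.map_cons] at hx hy hndx hndy
    rcases List.pairwise_cons.1 hx with ⟨hx1, hx2⟩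
    rcases List.pairwise_cons.1 hy with ⟨hy1, hy2⟩
    rw [pvMerge, if_pos h, List.map_cons, List.map_cons, pvKMerge, if_pos h, List.map_cons]
    congr 1
    · rw [pv_lookup_cons, if_pos rfl, (lookup_eq_none_iff _ _).2 ?_]
      rw [List.map_cons]
      intro hc
      rcases List.mem_cons.1 hc with hc | hc
      · omega
      · have := hy1 _ hc; omega
    · rw [ih hx2 hy (List.Nodup.of_cons (by simpa using hndx)) (by simpa using hndy)]
      simp only [List.map_cons]
      apply List.map_congr_left
      intro t ht
      have htm := (mem_pvKMerge _ _ _).1 ht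
      have hne : ¬ (t = x.1) := by
        rcases htm with hm | hm
        · have := hx1 t hm; omega
        · rcases List.mem_cons.1 hm with rfl | hm
          · omega
          · have := hy1 t hm; omega
      rw [pv_lookup_cons t x xs, if_neg hne]
  | case4 x xs y ys h h' ih =>
    simp only [List.map_cons] at hx hy hndx hndy
    rcases List.pairwise_cons.1 hx with ⟨hx1, hx2⟩
    rcases List.pairwise_cons.1 hy with ⟨hy1, hy2⟩
    rw [pvMerge, if_neg h, if_pos h', List.map_cons, List.map_cons, pvKMerge, if_neg h, if_pos h', List.map_cons]
    congr 1
    · rw [pv_lookup_cons, if_neg (by omega), pv_lookup_cons, if_pos rfl,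
        (lookup_eq_none_iff _ _).2 ?_]
      intro hc
      have := hx1 _ hc; omega
    · rw [ih hx hy2 (by simpa using hndx) (List.Nodup.of_cons (by simpa using hndy))]
      simp only [List.map_cons]
      apply List.map_congr_left
      intro t ht
      have htm := (mem_pvKMerge _ _ _).1 ht
      have hne : ¬ (t = y.1) := by
        rcases htm with hm | hm
        · rcases List.mem_cons.1 hm with rfl | hm
          · omega
          · have := hx1 t hm; omega
        · have := hy1 t hm; omega
      rw [pv_lookup_cons t y ys, if_neg hne]
  | case5 x xs y ys h h' ih =>
    have hxy : x.1 = y.1 := by omega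
    simp only [List.map_cons] at hx hy hndx hndy
    rcases List.pairwise_cons.1 hx with ⟨hx1, hx2⟩
    rcases List.pairwise_cons.1 hy with ⟨hy1, hy2⟩
    rw [pvMerge, if_neg h, if_neg h', List.map_cons, List.map_cons, pvKMerge, if_neg h, if_neg h', List.map_cons]
    congr 1
    · rw [pv_lookup_cons, if_pos rfl, pv_lookup_cons, if_pos hxy]
    · rw [ih hx2 hy2 (List.Nodup.of_cons (by simpa using hndx)) (List.Nodup.of_cons (by simpa using hndy))]
      apply List.map_congr_left
      intro t ht
      have htm := (mem_pvKMerge _ _ _).1 ht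
      have hnex : ¬ (t = x.1) := by
        rcases htm with hm | hm
        · have := hx1 t hm; omega
        · have := hy1 t hm; omega
      have hney : ¬ (t = y.1) := by omega
      rw [pv_lookup_cons t x xs, if_neg hnex, pv_lookup_cons t y ys, if_neg hney]

theorem pairwise_lt_keys (l : List (Int × Int))
    (h1 : l.Pairwise (fun p q => p.1 ≤ q.1)) (h2 : (l.map (fun p => p.1)).Nodup) :
    (l.map (fun p => p.1)).Pairwise (· < ·) := by
  rw [List.pairwise_map]
  have h2' := List.pairwise_map.1 h2
  exact (h1.and h2').imp (fun h => lt_of_le_of_ne h.1 h.2)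

theorem merge_threads_eq (a b : List (Int × Int)) :
    merge_threads a b = merge_threads_alt a b := by
  -- B side
  have key := fun (p : Int × Int) => p.1
  set La := pvLastWins a with hLa
  set Lb := pvLastWins b with hLb
  set Sa := PySem.List.sorted La (fun p => p.1) false with hSa
  set Sb := PySem.List.sorted Lb (fun p => p.1) false with hSb
  have hpa : Sa.Perm La := PySem.List.sorted_perm La (fun p => p.1) false
  have hpb : Sb.Perm Lb := PySem.List.sorted_perm Lb (fun p => p.1) false
  have hnda : (Sa.map (fun p => p.1)).Nodup :=
    ((hpa.map (fun p => p.1)).nodup_iff).2 (keys_pvLastWins_nodup a)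
  have hndb : (Sb.map (fun p => p.1)).Nodup :=
    ((hpb.map (fun p => p.1)).nodup_iff).2 (keys_pvLastWins_nodup b)
  have hplta : (Sa.map (fun p => p.1)).Pairwise (· < ·) :=
    pairwise_lt_keys Sa (PySem.List.sorted_pairwise La (fun p => p.1)) hnda
  have hpltb : (Sb.map (fun p => p.1)).Pairwise (· < ·) :=
    pairwise_lt_keys Sb (PySem.List.sorted_pairwise Lb (fun p => p.1)) hndb
  have hlookA : ∀ t, List.lookup t Sa = pvLastLook a t := by
    intro t
    rw [lookup_perm hpa ((hpa.map (fun p => p.1)).nodup_iff.2 (keys_pvLastWins_nodup a)) t]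
    exact lookup_pvLastWins a t
  have hlookB : ∀ t, List.lookup t Sb = pvLastLook b t := by
    intro t
    rw [lookup_perm hpb ((hpb.map (fun p => p.1)).nodup_iff.2 (keys_pvLastWins_nodup b)) t]
    exact lookup_pvLastWins b t
  have hB : merge_threads_alt a b
      = (pvKMerge (Sa.map (fun p => p.1)) (Sb.map (fun p => p.1))).map
          (fun t => (t, pvLastLook a t, pvLastLook b t)) := by
    show pvMerge Sa Sb = _
    rw [pvMerge_eq Sa Sb hplta hpltb]
    apply List.map_congr_left
    intro t _
    rw [hlookA t, hlookB t]
  -- A side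
  have hmemKa : ∀ t, t ∈ Sa.map (fun p => p.1) ↔ t ∈ a.map (fun p => p.1) := by
    intro t
    rw [(hpa.map (fun p => p.1)).mem_iff]
    exact mem_keys_pvLastWins a t
  have hmemKb : ∀ t, t ∈ Sb.map (fun p => p.1) ↔ t ∈ b.map (fun p => p.1) := by
    intro t
    rw [(hpb.map (fun p => p.1)).mem_iff]
    exact mem_keys_pvLastWins b t
  have hthreads : PySem.List.sorted
      (PySem.Set.union (PySem.Set.ofList (a.map (fun p => p.1))) (PySem.Set.ofList (b.map (fun p => p.1))))
      (fun t => t) false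
      = pvKMerge (Sa.map (fun p => p.1)) (Sb.map (fun p => p.1)) := by
    apply PySem.List.sorted_eq_of_perm_of_pairwise_lt
    · rw [List.perm_ext_iff_of_nodup]
      · intro t
        rw [mem_pvKMerge, hmemKa, hmemKb, PySem.Set.mem_union, PySem.Set.mem_ofList, PySem.Set.mem_ofList]
      · exact (pairwise_pvKMerge _ _ hplta hpltb).imp ne_of_lt
      · exact PySem.Set.nodup_union _ _ (PySem.Set.nodup_ofList _)
    · exact pairwise_pvKMerge _ _ hplta hpltb
  have hdictA : ∀ t,
      (a.foldl (fun d p => d.insert p.1 p.2) PySem.Dict.empty).get? t = pvLastLook a t := by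
    intro t
    rw [dict_foldl_get?]
    simp [pvLastLook]
  have hdictB : ∀ t,
      (b.foldl (fun d p => d.insert p.1 p.2) PySem.Dict.empty).get? t = pvLastLook b t := by
    intro t
    rw [dict_foldl_get?]
    simp [pvLastLook]
  show (PySem.List.sorted _ (fun t => t) false).foldl
      (fun rows t => rows ++ [(t, _, _)]) [] = _
  rw [PySem.List.foldl_append_singleton_eq_map]
  rw [hthreads, hB]
  apply List.map_congr_left
  intro t _
  rw [hdictA t, hdictB t]

-- ===== VERDICT (by name: the statement is the Claim_ definition above) =====
theorem merge_threads_spec : Claim_equal_merge_threads := by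
  intro a b _
  show merge_threads a b = merge_threads_alt a b
  exact merge_threads_eq a b
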